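-- pv_equiv track=rewrite | github.com/Rimurudemon/IC252- | ds2 assignments/bonusQuestions/main.py | permIden
-- ===== SOURCE A (Python) =====
-- def permIden(c, op):
--   if (len(c) == 0):
--     return op
--   p = []
--   for i in range(1, len(c)):
--     g = str(c[0]) + str(c[i])
--     if (g not in op and g not in p):
--       p.append(g)
--   return permIden(c[1:], op + p)
-- ===== SOURCE B (Python) =====
-- def permIden(c, op):
--     if len(c) == 0:
--         return op
--     result = list(op)
--     seen = set(op)
--     tail = c
--     while tail:
--         sx = str(tail[0])
--         tail = tail[1:]
--         for y in tail:
--             g = sx + str(y)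
--             if g not in seen:
--                 seen.add(g)
--                 result.append(g)
--     return result
-- ===== Notes on version B (the rewrite author's own statement) =====
-- stated objective: faster
-- what changed: Replaces A's recursion (which rebuilds op+p at every level and tests membership by scanning the growing op list) with a single iterative while loop that keeps one result list and one hash set for O(1) membership tests.
import Mathlib
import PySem

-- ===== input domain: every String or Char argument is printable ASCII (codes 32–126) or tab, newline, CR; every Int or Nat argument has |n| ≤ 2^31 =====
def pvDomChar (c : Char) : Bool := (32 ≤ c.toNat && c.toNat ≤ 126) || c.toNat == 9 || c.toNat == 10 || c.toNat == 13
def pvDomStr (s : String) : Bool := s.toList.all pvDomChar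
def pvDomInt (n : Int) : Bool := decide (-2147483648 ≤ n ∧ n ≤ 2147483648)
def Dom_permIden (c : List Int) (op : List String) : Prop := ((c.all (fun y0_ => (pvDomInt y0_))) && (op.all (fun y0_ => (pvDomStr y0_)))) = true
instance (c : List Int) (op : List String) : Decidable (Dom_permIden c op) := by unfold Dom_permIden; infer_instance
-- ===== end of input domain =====

-- B replaces A's recursion (rebuilding op+p and scanning op for membership) with one
-- iterative pass keeping a single result list and a hash set of seen strings.


-- ===== PORT A =====
-- A: recursion on c; per level collect new pairs p (tested against op and p), recurse on c[1:] with op + p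
def permIden : List Int → List String → List String
  | [], op => op
  | x :: rest, op =>
    let p := rest.foldl (fun p y =>
      let g := PySem.Int.toStr x ++ PySem.Int.toStr y
      if g ∉ op ∧ g ∉ p then p ++ [g] else p) []
    permIden rest (op ++ p)

-- ===== PORT B =====
-- B's while loop over the shrinking tail, carrying (result, seen)
def permIdenAltLoop : List Int → List String → PySem.Set String → List String
  | [], result, _ => result
  | x :: t, result, seen =>
    let sx := PySem.Int.toStr x
    let rs := t.foldl (fun (rs : List String × PySem.Set String) y =>
        let g := sx ++ PySem.Int.toStr y
        if PySem.Set.contains rs.2 g then rs else (rs.1 ++ [g], PySem.Set.add rs.2 g)) (result, seen)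
    permIdenAltLoop t rs.1 rs.2

def permIden_alt (c : List Int) (op : List String) : List String :=
  if c.length = 0 then op
  else permIdenAltLoop c op (PySem.Set.ofList op)

-- ===== PRECONDITION & SPEC =====
def Spec_permIden (c : List Int) (op : List String) (out : List String) : Prop := out = permIden_alt c op
instance (c : List Int) (op : List String) (out : List String) : Decidable (Spec_permIden c op out) := by unfold Spec_permIden; infer_instance

-- ===== CLAIM (what is proved, stated in full; the proofs are below) =====
def Claim_equal_permIden : Prop := ∀ (c : List Int) (op : List String), Dom_permIden c op → Spec_permIden c op (permIden c op)

-- ===== LEMMAS AND PROOFS =====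

-- canonical form: dedup-append the pair strings of c onto acc
def pvPairs : List Int → List String
  | [] => []
  | x :: t => t.map (fun y => PySem.Int.toStr x ++ PySem.Int.toStr y) ++ pvPairs t

def pvDD (acc : List String) (l : List String) : List String :=
  l.foldl (fun acc g => if g ∈ acc then acc else acc ++ [g]) acc

theorem pvDD_append (acc : List String) (l₁ l₂ : List String) :
    pvDD acc (l₁ ++ l₂) = pvDD (pvDD acc l₁) l₂ := by
  simp [pvDD, List.foldl_append]

-- A's inner loop, shifted: op ++ (fold starting from p) = dedup-append onto op ++ p
theorem permIden_inner (x : Int) (op : List String) :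
    ∀ (level : List Int) (p : List String),
      op ++ level.foldl (fun p y =>
        let g := PySem.Int.toStr x ++ PySem.Int.toStr y
        if g ∉ op ∧ g ∉ p then p ++ [g] else p) p
      = pvDD (op ++ p) (level.map (fun y => PySem.Int.toStr x ++ PySem.Int.toStr y)) := by
  intro level
  induction level with
  | nil => intro p; simp [pvDD]
  | cons y t ih =>
    intro p
    simp only [List.foldl_cons, List.map_cons, pvDD, List.foldl_cons]
    by_cases h : (PySem.Int.toStr x ++ PySem.Int.toStr y) ∈ op ++ p
    · have h' : ¬ ((PySem.Int.toStr x ++ PySem.Int.toStr y) ∉ op ∧ (PySem.Int.toStr x ++ PySem.Int.toStr y) ∉ p) := by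
        simp only [List.mem_append] at h; tauto
    -- rewrite both conditions
      simpa [h, h'] using ih p
    · have h' : (PySem.Int.toStr x ++ PySem.Int.toStr y) ∉ op ∧ (PySem.Int.toStr x ++ PySem.Int.toStr y) ∉ p := by
        simp only [List.mem_append] at h; tauto
      have := ih (p ++ [PySem.Int.toStr x ++ PySem.Int.toStr y])
      simpa [h, h', List.append_assoc] using this
  
theorem permIden_eq_pvDD : ∀ (c : List Int) (op : List String),
    permIden c op = pvDD op (pvPairs c) := by
  intro c
  induction c with
  | nil => intro op; simp [permIden, pvPairs, pvDD]
  | cons x rest ih =>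
    intro op
    have h := permIden_inner x op rest []
    simp only [List.append_nil] at h
    simp only [permIden, pvPairs, pvDD_append, ih, h]

-- B's inner fold: with seen's membership equal to result's, the result component is pvDD
theorem permIdenAlt_inner (sx : String) :
    ∀ (t : List Int) (result : List String) (seen : PySem.Set String),
      (∀ g : String, g ∈ seen ↔ g ∈ result) →
      (t.foldl (fun (rs : List String × PySem.Set String) y =>
          let g := sx ++ PySem.Int.toStr y
          if PySem.Set.contains rs.2 g then rs else (rs.1 ++ [g], PySem.Set.add rs.2 g)) (result, seen)).1
        = pvDD result (t.map (fun y => sx ++ PySem.Int.toStr y))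
      ∧ (∀ g : String, g ∈ (t.foldl (fun (rs : List String × PySem.Set String) y =>
          let g := sx ++ PySem.Int.toStr y
          if PySem.Set.contains rs.2 g then rs else (rs.1 ++ [g], PySem.Set.add rs.2 g)) (result, seen)).2
          ↔ g ∈ (t.foldl (fun (rs : List String × PySem.Set String) y =>
          let g := sx ++ PySem.Int.toStr y
          if PySem.Set.contains rs.2 g then rs else (rs.1 ++ [g], PySem.Set.add rs.2 g)) (result, seen)).1) := by
  intro t
  induction t with
  | nil => intro result seen hinv; exact ⟨rfl, fun g => by simpa [pvDD] using hinv g⟩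
  | cons y t ih =>
    intro result seen hinv
    by_cases h : (sx ++ PySem.Int.toStr y) ∈ seen
    · have hmem : (sx ++ PySem.Int.toStr y) ∈ result := (hinv _).1 h
      have := ih result seen hinv
      simpa [pvDD, h, hmem] using this
    · have hmem : (sx ++ PySem.Int.toStr y) ∉ result := fun hc => h ((hinv _).2 hc)
      have hinv' : ∀ g : String, g ∈ PySem.Set.add seen (sx ++ PySem.Int.toStr y)
          ↔ g ∈ result ++ [sx ++ PySem.Int.toStr y] := by
        intro g
        rw [PySem.Set.mem_add]
        simp only [List.mem_append, List.mem_singleton]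
        exact or_congr (hinv g) Iff.rfl
      have := ih (result ++ [sx ++ PySem.Int.toStr y]) (PySem.Set.add seen (sx ++ PySem.Int.toStr y)) hinv'
      simpa [pvDD, h, hmem] using this

theorem permIdenAltLoop_eq_pvDD :
    ∀ (tail : List Int) (result : List String) (seen : PySem.Set String),
      (∀ g : String, g ∈ seen ↔ g ∈ result) →
      permIdenAltLoop tail result seen = pvDD result (pvPairs tail) := by
  intro tail
  induction tail with
  | nil => intro result seen _; simp [permIdenAltLoop, pvPairs, pvDD]
  | cons x t ih =>
    intro result seen hinv
    obtain ⟨h1, h2⟩ := permIdenAlt_inner (PySem.Int.toStr x) t result seen hinv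
    simp only [permIdenAltLoop]
    rw [ih _ _ (fun g => (h2 g).trans (by rw [h1]))]
    rw [h1]
    simp only [pvPairs, pvDD_append]

theorem permIden_alt_eq_pvDD (c : List Int) (op : List String) :
    permIden_alt c op = pvDD op (pvPairs c) := by
  unfold permIden_alt
  by_cases h : c.length = 0
  · rw [List.length_eq_zero_iff] at h; subst h; simp [pvPairs, pvDD]
  · simp only [if_neg h]
    exact permIdenAltLoop_eq_pvDD c op (PySem.Set.ofList op)
      (fun g => PySem.Set.mem_ofList op g)

-- ===== VERDICT (by name: the statement is the Claim_ definition above) =====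
theorem permIden_spec : Claim_equal_permIden := by
  intro c op _
  unfold Spec_permIden
  rw [permIden_eq_pvDD, permIden_alt_eq_pvDD]
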